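-- pv_equiv track=rewrite | github.com/elaplas/data_structure_and_algos | puzzels/longest_substring_without-repeat/lswr.py | lswr
-- ===== SOURCE A (Python) =====
-- def lswr(str_x):
--     lookup = set()
--     res = ""
--     for char in str_x:
--         if char not in lookup:
--             lookup.add(char)
--             res += char
--     return res, len(lookup)
-- ===== SOURCE B (Python) =====
-- def lswr(str_x):
--     # Backward pass: later writes are overwritten, so each char ends up mapped
--     # to its FIRST occurrence index; then the distinct chars are ordered by
--     # sorting on that index instead of by order-preserving accumulation.
--     first = {c: i for i, c in reversed(list(enumerate(str_x)))}
--     order = sorted(first, key=first.get)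
--     return ''.join(order), len(order)
-- ===== Notes on version B (the rewrite author's own statement) =====
-- stated objective: alternative
-- what changed: B replaces A's forward pass with a membership test and incremental accumulation by a backward overwrite pass building a char->first-occurrence-index map, then sorts the distinct chars by that index to recover first-occurrence order.
import Mathlib
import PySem

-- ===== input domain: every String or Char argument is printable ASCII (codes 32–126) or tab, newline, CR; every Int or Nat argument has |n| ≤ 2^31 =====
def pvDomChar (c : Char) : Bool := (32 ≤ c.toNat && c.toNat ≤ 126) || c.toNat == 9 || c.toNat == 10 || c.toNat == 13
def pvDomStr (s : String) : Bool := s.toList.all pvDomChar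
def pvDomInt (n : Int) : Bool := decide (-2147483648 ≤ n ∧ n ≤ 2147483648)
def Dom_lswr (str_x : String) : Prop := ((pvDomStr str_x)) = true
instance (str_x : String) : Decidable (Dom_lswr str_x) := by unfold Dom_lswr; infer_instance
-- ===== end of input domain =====

-- B builds a char→first-occurrence-index map by a backward overwrite pass, then sorts the
-- distinct chars by that index (alternative decomposition; not claimed faster).

-- ===== PORT A =====
-- A: loop over chars keeping a set `lookup` and an accumulated string `res`.
def lswr (str_x : String) : String × Int :=
  let st := str_x.toList.foldl
    (fun (acc : PySem.Set Char × String) char =>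
      if ¬ PySem.Set.contains acc.1 char then
        (PySem.Set.add acc.1 char, acc.2.push char)
      else acc)
    (PySem.Set.empty, "")
  (st.2, (PySem.Set.len st.1 : Int))

-- ===== PORT B =====
-- B: first = {c: i for i, c in reversed(list(enumerate(str_x)))}  (overwrite ⇒ first index wins);
--    order = sorted(first, key=first.get); return ''.join(order), len(order).
--    first.get is ported as getD _ 0: exact here, every key sorted over is present in `first`.
def lswr_alt (str_x : String) : String × Int :=
  let first : PySem.Dict Char Int :=
    ((PySem.List.enumerate str_x.toList 0).reverse).foldl
      (fun d p => d.insert p.2 p.1) PySem.Dict.empty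
  let order := PySem.List.sorted first.keys (fun c => first.getD c 0)
  (String.ofList order, (order.length : Int))

-- ===== PRECONDITION & SPEC =====
def Spec_lswr (str_x : String) (out : String × Int) : Prop := out = lswr_alt str_x
instance (str_x : String) (out : String × Int) : Decidable (Spec_lswr str_x out) := by unfold Spec_lswr; infer_instance

-- ===== CLAIM (what is proved, stated in full; the proofs are below) =====
def Claim_equal_lswr : Prop := ∀ (str_x : String), Dom_lswr str_x → Spec_lswr str_x (lswr str_x)

-- ===== LEMMAS AND PROOFS =====

-- index of c in m, as a Nat (0 when absent; only used on members)
def pvNix (m : List Char) (c : Char) : Nat := (PySem.List.index? m c).getD 0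

theorem push_ofList (l : List Char) (c : Char) :
    (String.ofList l).push c = String.ofList (l ++ [c]) := by
  apply String.toList_injective; simp

-- A's loop computes (Set.update s l, that set as a string)
theorem lswr_loop_inv (l : List Char) (s : PySem.Set Char) :
    l.foldl
      (fun (acc : PySem.Set Char × String) char =>
        if ¬ PySem.Set.contains acc.1 char then
          (PySem.Set.add acc.1 char, acc.2.push char)
        else acc)
      (s, String.ofList s)
    = (PySem.Set.update s l, String.ofList (PySem.Set.update s l)) := by
  induction l generalizing s with
  | nil => simp [PySem.Set.update]
  | cons c t ih =>
    have hfold : PySem.Set.update s (c :: t) = PySem.Set.update (PySem.Set.add s c) t := rfl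
    by_cases h : PySem.Set.contains s c
    · have hadd : PySem.Set.add s c = s := by simp_all [PySem.Set.add]
      rw [List.foldl_cons, hfold, hadd]
      simp only [h, not_true, if_neg, not_false_iff]
      exact ih s
    · rw [List.foldl_cons, hfold]
      simp only [h]
      rw [push_ofList]
      have hadd : PySem.Set.add s c = s ++ [c] := by simp_all [PySem.Set.add]
      rw [← hadd]
      exact ih (PySem.Set.add s c)

-- the backward-insert fold looks up to the FIRST matching pair of q
theorem getD_foldl_rev_insert (q : List (Int × Char)) (d : PySem.Dict Char Int)
    (c : Char) (v0 : Int) :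
    ((q.reverse).foldl (fun d p => d.insert p.2 p.1) d).getD c v0 =
      match q.find? (fun p => p.2 == c) with
      | some p => p.1
      | none => d.getD c v0 := by
  rw [List.foldl_reverse]
  induction q with
  | nil => simp
  | cons p t ih =>
    by_cases h : p.2 = c
    · simp [h]
    · simp [h, PySem.Dict.getD_insert, Ne.symm h, ih]

-- find? over enumerate returns the first occurrence with its index
theorem find?_enumerate_eq (l : List Char) (c : Char) (k : Nat) :
    ∀ s : Int, PySem.List.index? l c = some k →
    (PySem.List.enumerate l s).find? (fun p => p.2 == c) = some (s + (k : Int), c) := by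
  induction l generalizing k with
  | nil => intro s h; simp [PySem.List.index?_eq_idxOf?] at h
  | cons a t ih =>
    intro s h
    by_cases hac : a = c
    · subst hac
      rw [PySem.List.index?_cons_self] at h
      obtain rfl : (0 : Nat) = k := by injection h
      simp [PySem.List.enumerate_cons]
    · rw [PySem.List.index?_cons_of_ne t hac] at h
      obtain ⟨k', hk', rfl⟩ := Option.map_eq_some_iff.mp h
      rw [PySem.List.enumerate_cons,
        List.find?_cons_of_neg (by simp [hac]), ih k' (s + 1) hk']
      simp only [Option.some.injEq, Prod.mk.injEq]
      refine ⟨by push_cast; omega, trivial⟩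

-- the set of first occurrences is pairwise strictly increasing in first index
theorem pairwise_nix_ofList (m : List Char) :
    (PySem.Set.ofList m).Pairwise (fun a b => pvNix m a < pvNix m b) := by
  induction m using List.reverseRecOn with
  | nil => simp [PySem.Set.ofList_eq_foldl]
  | append_singleton m c ih =>
    have hof : PySem.Set.ofList (m ++ [c]) = PySem.Set.add (PySem.Set.ofList m) c := by
      simp [PySem.Set.ofList_eq_foldl, List.foldl_append]
    have hsame : ∀ a ∈ m, pvNix (m ++ [c]) a = pvNix m a := by
      intro a ha
      unfold pvNix
      rw [PySem.List.index?_append_of_mem [c] ha]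
    have hmem : ∀ a, a ∈ PySem.Set.ofList m → a ∈ m := fun a ha =>
      (PySem.Set.mem_ofList m a).mp ha
    have hold : (PySem.Set.ofList m).Pairwise (fun a b => pvNix (m ++ [c]) a < pvNix (m ++ [c]) b) := by
      refine ih.imp_of_mem ?_
      intro a b ha hb hr
      rw [hsame a (hmem a ha), hsame b (hmem b hb)]
      exact hr
    by_cases hc : c ∈ m
    · have hadd : PySem.Set.add (PySem.Set.ofList m) c = PySem.Set.ofList m := by
        simp [PySem.Set.add, PySem.Set.contains, PySem.Set.mem_ofList, hc]
      rw [hof, hadd]; exact hold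
    · have hadd : PySem.Set.add (PySem.Set.ofList m) c = PySem.Set.ofList m ++ [c] := by
        simp [PySem.Set.add, PySem.Set.contains, PySem.Set.mem_ofList, hc]
      rw [hof, hadd]
      rw [List.pairwise_append]
      refine ⟨hold, by simp, ?_⟩
      intro a ha b hb
      have hb' : b = c := by simpa using hb
      rw [hb']
      have haM : a ∈ m := hmem a ha
      -- pvNix (m++[c]) a = pvNix m a < m.length = pvNix (m++[c]) c
      have hlast : pvNix (m ++ [c]) c = m.length := by
        unfold pvNix
        rw [PySem.List.index?_append_singleton_self m c hc]
        rfl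
      have hsm : pvNix m a < m.length := by
        have hsome : (PySem.List.index? m a).isSome := by
          rw [PySem.List.index?_isSome_iff]; exact haM
        obtain ⟨j, hj⟩ := Option.isSome_iff_exists.mp hsome
        obtain ⟨pre, suf, hm, hlen, -⟩ := (PySem.List.index?_eq_some_iff m a j).mp hj
        unfold pvNix
        rw [hj]
        subst hm
        simp [← hlen]
      rw [hsame a haM, hlast]
      exact hsm

-- the dict B builds, as a function of the char list (proof-side abbreviation)
def pvDict (l : List Char) : PySem.Dict Char Int :=
  ((PySem.List.enumerate l 0).reverse).foldl (fun d p => d.insert p.2 p.1) PySem.Dict.empty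

-- B's sorted key list IS the ordered dedup
theorem sorted_pvDict_eq_dedup (l : List Char) :
    PySem.List.sorted (pvDict l).keys (fun c => (pvDict l).getD c 0) = PySem.List.dedup l := by
  have hkeys : (pvDict l).keys = PySem.Set.ofList l.reverse := by
    unfold pvDict
    rw [PySem.Dict.keys_foldl_insert_key ((PySem.List.enumerate l 0).reverse) (fun p => p.2)
      (fun _ p => p.1) PySem.Dict.empty]
    have : List.map (fun p => p.2) ((PySem.List.enumerate l 0).reverse) = l.reverse := by
      rw [List.map_reverse, PySem.List.map_snd_enumerate]
    rw [this]
    rfl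
  have hgetD : ∀ c ∈ l, (pvDict l).getD c 0 = ((pvNix l c : Nat) : Int) := by
    intro c hc
    have hsome : (PySem.List.index? l c).isSome := by
      rw [PySem.List.index?_isSome_iff]; exact hc
    obtain ⟨k, hk⟩ := Option.isSome_iff_exists.mp hsome
    unfold pvDict
    rw [getD_foldl_rev_insert, find?_enumerate_eq l c k 0 hk]
    unfold pvNix
    rw [hk]
    simp
  have hperm : (PySem.List.dedup l).Perm (pvDict l).keys := by
    rw [hkeys, PySem.List.dedup_eq_ofList]
    rw [List.perm_ext_iff_of_nodup (PySem.Set.nodup_ofList l) (PySem.Set.nodup_ofList l.reverse)]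
    intro a
    simp [PySem.Set.mem_ofList]
  have hpair : (PySem.List.dedup l).Pairwise
      (fun a b => (pvDict l).getD a 0 < (pvDict l).getD b 0) := by
    rw [PySem.List.dedup_eq_ofList]
    refine (pairwise_nix_ofList l).imp_of_mem ?_
    intro a b ha hb hr
    have haM : a ∈ l := (PySem.Set.mem_ofList l a).mp ha
    have hbM : b ∈ l := (PySem.Set.mem_ofList l b).mp hb
    rw [hgetD a haM, hgetD b hbM]
    exact_mod_cast hr
  exact PySem.List.sorted_eq_of_perm_of_pairwise_lt (pvDict l).keys (PySem.List.dedup l)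
    (fun c => (pvDict l).getD c 0) hperm hpair

-- ===== VERDICT (by name: the statement is the Claim_ definition above) =====
theorem lswr_spec : Claim_equal_lswr := by
  intro str_x _
  unfold Spec_lswr lswr lswr_alt
  rw [show ("" : String) = String.ofList (PySem.Set.empty : PySem.Set Char) from rfl,
      lswr_loop_inv str_x.toList PySem.Set.empty]
  change (String.ofList (PySem.Set.ofList str_x.toList),
          PySem.Set.len (PySem.Set.ofList str_x.toList))
      = (String.ofList (PySem.List.sorted (pvDict str_x.toList).keys
            (fun c => (pvDict str_x.toList).getD c 0)),
         ((PySem.List.sorted (pvDict str_x.toList).keys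
            (fun c => (pvDict str_x.toList).getD c 0)).length : Int))
  rw [sorted_pvDict_eq_dedup, PySem.List.dedup_eq_ofList]
  rfl
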